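-- pv_equiv track=rewrite | github.com/bunkerity/bunkerweb | misc/fix_readme_indentation.py | normalize_indentation
-- ===== SOURCE A (Python) =====
-- def normalize_indentation(lines: list[str]) -> list[str]:
--     new: list[str] = []
--     i = 0
--     length = len(lines)
--
--     def is_section_terminator(crline: str) -> bool:
--         return crline.lstrip().startswith(("=== ", "## ", "### ", "!!! "))
--
--     while i < length:
--         line = lines[i]
--
--         # Admonition block
--         if line.lstrip().startswith("!!! "):
--             new.append(line)
--             i += 1
--             # Indent following lines until blank line or terminator
--             while i < length:
--                 crline = lines[i]
--                 if crline.strip() == "":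
--                     new.append(crline)
--                     i += 1
--                     break  # blank line ends admonition block
--                 if is_section_terminator(crline):
--                     break
--                 if not crline.startswith("    "):
--                     # Avoid adding indentation to fenced code delimiters already indented
--                     crline = "    " + crline.lstrip()
--                 new.append(crline)
--                 i += 1
--             continue
--
--         # Tab header
--         if line.lstrip().startswith("=== "):
--             new.append(line)
--             i += 1
--             # Process content until next tab header / heading
--             while i < length:
--                 crline = lines[i]
--                 if is_section_terminator(crline):
--                     break
--                 if crline.strip() == "":
--                     new.append(crline)
--                     i += 1
--                     continue
--                 if not crline.startswith("    "):
--                     crline = "    " + crline.lstrip()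
--                 new.append(crline)
--                 i += 1
--             continue
--
--         new.append(line)
--         i += 1
--
--     return new
-- ===== SOURCE B (Python) =====
-- def normalize_indentation(lines: list[str]) -> list[str]:
--     # Single-pass state machine (NORMAL/ADMON/TAB) instead of nested while loops.
--     def is_section_terminator(crline: str) -> bool:
--         return crline.lstrip().startswith(("=== ", "## ", "### ", "!!! "))
--
--     def indent(crline: str) -> str:
--         return crline if crline.startswith("    ") else "    " + crline.lstrip()
--
--     NORMAL, ADMON, TAB = 0, 1, 2
--     out: list[str] = []
--     state = NORMAL
--     for line in lines:
--         while True: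
--             if state == ADMON:
--                 if line.strip() == "":
--                     out.append(line)
--                     state = NORMAL
--                 elif is_section_terminator(line):
--                     state = NORMAL
--                     continue  # re-dispatch the same line
--                 else:
--                     out.append(indent(line))
--             elif state == TAB:
--                 if is_section_terminator(line):
--                     state = NORMAL
--                     continue  # re-dispatch the same line
--                 elif line.strip() == "":
--                     out.append(line)
--                 else:
--                     out.append(indent(line))
--             else:
--                 out.append(line)
--                 if line.lstrip().startswith("!!! "):
--                     state = ADMON
--                 elif line.lstrip().startswith("=== "):
--                     state = TAB
--             break
--     return out
-- ===== Notes on version B (the rewrite author's own statement) =====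
-- stated objective: alternative
-- what changed: Replaced the outer while-loop with two nested inner while-loops by a single pass over the lines driven by an explicit NORMAL/ADMON/TAB state variable that re-dispatches terminator lines.
import Mathlib
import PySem

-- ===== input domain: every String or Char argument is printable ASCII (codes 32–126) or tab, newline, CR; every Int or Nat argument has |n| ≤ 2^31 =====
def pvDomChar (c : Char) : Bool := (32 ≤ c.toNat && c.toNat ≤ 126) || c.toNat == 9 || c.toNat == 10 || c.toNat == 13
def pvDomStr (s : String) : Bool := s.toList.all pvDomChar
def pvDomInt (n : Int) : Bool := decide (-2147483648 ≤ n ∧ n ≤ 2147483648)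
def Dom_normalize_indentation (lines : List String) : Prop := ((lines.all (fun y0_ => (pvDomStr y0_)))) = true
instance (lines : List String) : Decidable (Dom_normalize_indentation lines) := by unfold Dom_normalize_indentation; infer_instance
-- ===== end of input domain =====

-- B replaces A's outer loop with two nested inner while-loops by a single pass driven by an
-- explicit state variable (NORMAL/ADMON/TAB) with re-dispatch of terminator lines; objective: simpler.

-- ===== PORT A =====
-- shared helper: Python's nested is_section_terminator
def isSectionTerminator (crline : String) : Bool :=
  PySem.Str.startswith (PySem.Str.lstrip crline) "=== " ||
  PySem.Str.startswith (PySem.Str.lstrip crline) "## " ||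
  PySem.Str.startswith (PySem.Str.lstrip crline) "### " ||
  PySem.Str.startswith (PySem.Str.lstrip crline) "!!! "

-- A's inner admonition while-loop: returns (lines appended, remaining lines)
def admonLoop : List String → List String × List String
  | [] => ([], [])
  | crline :: rest =>
    if PySem.Str.strip crline == "" then ([crline], rest)
    else if isSectionTerminator crline then ([], crline :: rest)
    else
      let crline' := if !PySem.Str.startswith crline "    "
        then "    " ++ PySem.Str.lstrip crline else crline
      let r := admonLoop rest
      (crline' :: r.1, r.2)

-- A's inner tab while-loop: returns (lines appended, remaining lines)
def tabLoop : List String → List String × List String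
  | [] => ([], [])
  | crline :: rest =>
    if isSectionTerminator crline then ([], crline :: rest)
    else if PySem.Str.strip crline == "" then
      let r := tabLoop rest
      (crline :: r.1, r.2)
    else
      let crline' := if !PySem.Str.startswith crline "    "
        then "    " ++ PySem.Str.lstrip crline else crline
      let r := tabLoop rest
      (crline' :: r.1, r.2)

-- termination facts for the outer loop (the inner loops consume a prefix)
theorem admonLoop_snd_le : ∀ l : List String, (admonLoop l).2.length ≤ l.length := by
  intro l
  induction l with
  | nil => simp [admonLoop]
  | cons x t ih =>
    simp only [admonLoop]
    split_ifs <;> simp <;> omega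

theorem tabLoop_snd_le : ∀ l : List String, (tabLoop l).2.length ≤ l.length := by
  intro l
  induction l with
  | nil => simp [tabLoop]
  | cons x t ih =>
    simp only [tabLoop]
    split_ifs <;> simp <;> omega

def normalize_indentation : List String → List String
  | [] => []
  | line :: rest =>
    if PySem.Str.startswith (PySem.Str.lstrip line) "!!! " then
      let r := admonLoop rest
      line :: (r.1 ++ normalize_indentation r.2)
    else if PySem.Str.startswith (PySem.Str.lstrip line) "=== " then
      let r := tabLoop rest
      line :: (r.1 ++ normalize_indentation r.2)
    else
      line :: normalize_indentation rest
termination_by l => l.length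
decreasing_by
  · exact Nat.lt_succ_of_le (admonLoop_snd_le rest)
  · exact Nat.lt_succ_of_le (tabLoop_snd_le rest)
  · simp

-- ===== PORT B =====
-- B's indent helper
def indentB (crline : String) : String :=
  if PySem.Str.startswith crline "    " then crline
  else "    " ++ PySem.Str.lstrip crline

-- B's NORMAL-state handler: append the line, pick the next state (0 NORMAL, 1 ADMON, 2 TAB)
def stepNormal (line : String) : List String × Nat :=
  ([line],
    if PySem.Str.startswith (PySem.Str.lstrip line) "!!! " then 1
    else if PySem.Str.startswith (PySem.Str.lstrip line) "=== " then 2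
    else 0)

-- B's loop body: one line in the current state (terminators re-dispatch to NORMAL)
def stepB (acc : List String × Nat) (line : String) : List String × Nat :=
  let r :=
    if acc.2 == 1 then
      if PySem.Str.strip line == "" then ([line], 0)
      else if isSectionTerminator line then stepNormal line
      else ([indentB line], 1)
    else if acc.2 == 2 then
      if isSectionTerminator line then stepNormal line
      else if PySem.Str.strip line == "" then ([line], 2)
      else ([indentB line], 2)
    else stepNormal line
  (acc.1 ++ r.1, r.2)

def normalize_indentation_alt (lines : List String) : List String :=
  (lines.foldl stepB (([] : List String), 0)).1

-- ===== PRECONDITION & SPEC =====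
def Spec_normalize_indentation (lines : List String) (out : List String) : Prop := out = normalize_indentation_alt lines
instance (lines : List String) (out : List String) : Decidable (Spec_normalize_indentation lines out) := by unfold Spec_normalize_indentation; infer_instance

-- ===== CLAIM (what is proved, stated in full; the proofs are below) =====
def Claim_equal_normalize_indentation : Prop := ∀ (lines : List String), Dom_normalize_indentation lines → Spec_normalize_indentation lines (normalize_indentation lines)

-- ===== LEMMAS AND PROOFS =====

theorem foldl_stepB_acc : ∀ (l : List String) (a : List String) (s : Nat),
    (List.foldl stepB (a, s) l).1 = a ++ (List.foldl stepB ([], s) l).1 := by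
  intro l
  induction l with
  | nil => intro a s; simp
  | cons x t ih =>
    intro a s
    simp only [List.foldl, stepB]
    rw [ih, ih]
    conv_rhs => rw [ih]
    simp

theorem indent_eq (c : String) :
    (if !PySem.Str.startswith c "    " then "    " ++ PySem.Str.lstrip c else c) = indentB c := by
  simp only [indentB]
  cases h : PySem.Str.startswith c "    " <;> simp

theorem stepB_0 (a : List String) (x : String) :
    stepB (a, 0) x = (a ++ [x],
      if PySem.Str.startswith (PySem.Str.lstrip x) "!!! " then 1
      else if PySem.Str.startswith (PySem.Str.lstrip x) "=== " then 2 else 0) := rfl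

theorem stepB_1_blank (a : List String) (x : String) (hb : (PySem.Str.strip x == "") = true) :
    stepB (a, 1) x = (a ++ [x], 0) := by
  simp [stepB, hb]

theorem stepB_1_term (a : List String) (x : String) (hb : (PySem.Str.strip x == "") = false)
    (hterm : isSectionTerminator x = true) :
    stepB (a, 1) x = (a ++ [x],
      if PySem.Str.startswith (PySem.Str.lstrip x) "!!! " then 1
      else if PySem.Str.startswith (PySem.Str.lstrip x) "=== " then 2 else 0) := by
  simp [stepB, stepNormal, hb, hterm]

theorem stepB_1_other (a : List String) (x : String) (hb : (PySem.Str.strip x == "") = false)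
    (hterm : isSectionTerminator x = false) :
    stepB (a, 1) x = (a ++ [indentB x], 1) := by
  simp [stepB, stepNormal, hb, hterm]

theorem stepB_2_term (a : List String) (x : String) (hterm : isSectionTerminator x = true) :
    stepB (a, 2) x = (a ++ [x],
      if PySem.Str.startswith (PySem.Str.lstrip x) "!!! " then 1
      else if PySem.Str.startswith (PySem.Str.lstrip x) "=== " then 2 else 0) := by
  simp [stepB, stepNormal, hterm]

theorem stepB_2_blank (a : List String) (x : String) (hterm : isSectionTerminator x = false)
    (hb : (PySem.Str.strip x == "") = true) :
    stepB (a, 2) x = (a ++ [x], 2) := by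
  simp [stepB, hterm, hb]

theorem stepB_2_other (a : List String) (x : String) (hterm : isSectionTerminator x = false)
    (hb : (PySem.Str.strip x == "") = false) :
    stepB (a, 2) x = (a ++ [indentB x], 2) := by
  simp [stepB, hterm, hb]

theorem main_inv : ∀ (n : Nat) (l : List String), l.length ≤ n →
    ((List.foldl stepB ([], 0) l).1 = normalize_indentation l) ∧
    ((List.foldl stepB ([], 1) l).1 =
      (admonLoop l).1 ++ normalize_indentation (admonLoop l).2) ∧
    ((List.foldl stepB ([], 2) l).1 =
      (tabLoop l).1 ++ normalize_indentation (tabLoop l).2) := by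
  intro n
  induction n with
  | zero =>
    intro l hl
    have hnil : l = [] := List.eq_nil_of_length_eq_zero (Nat.le_zero.mp hl)
    subst hnil
    refine ⟨?_, ?_, ?_⟩ <;> simp [normalize_indentation, admonLoop, tabLoop]
  | succ n ih =>
    intro l hl
    match l with
    | [] =>
      refine ⟨?_, ?_, ?_⟩ <;> simp [normalize_indentation, admonLoop, tabLoop]
    | x :: t =>
      have ht : t.length ≤ n := by simp at hl; omega
      obtain ⟨ih0, ih1, ih2⟩ := ih t ht
      refine ⟨?_, ?_, ?_⟩
      · -- state NORMAL
        simp only [List.foldl_cons, stepB_0, List.nil_append]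
        rw [normalize_indentation]
        cases h1 : PySem.Str.startswith (PySem.Str.lstrip x) "!!! " with
        | true =>
          simp only [eq_self_iff_true, if_true]
          rw [foldl_stepB_acc, ih1, List.singleton_append]
        | false =>
          simp only [Bool.false_eq_true, if_false]
          cases h2 : PySem.Str.startswith (PySem.Str.lstrip x) "=== " with
          | true =>
            simp only [eq_self_iff_true, if_true]
            rw [foldl_stepB_acc, ih2, List.singleton_append]
          | false =>
            simp only [Bool.false_eq_true, if_false]
            rw [foldl_stepB_acc, ih0, List.singleton_append]
      · -- state ADMON
        cases hb : PySem.Str.strip x == "" with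
        | true =>
          simp only [List.foldl_cons, stepB_1_blank _ _ hb, List.nil_append]
          rw [foldl_stepB_acc, ih0]
          simp only [admonLoop, hb, eq_self_iff_true, if_true, List.singleton_append, List.cons_append]
        | false =>
          cases hterm : isSectionTerminator x with
          | true =>
            simp only [List.foldl_cons, stepB_1_term _ _ hb hterm, List.nil_append,
              admonLoop, hb, hterm, eq_self_iff_true, if_true, Bool.false_eq_true, if_false]
            rw [normalize_indentation]
            cases h1 : PySem.Str.startswith (PySem.Str.lstrip x) "!!! " with
            | true =>
              simp only [eq_self_iff_true, if_true]
              rw [foldl_stepB_acc, ih1, List.singleton_append]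
            | false =>
              simp only [Bool.false_eq_true, if_false]
              cases h2 : PySem.Str.startswith (PySem.Str.lstrip x) "=== " with
              | true =>
                simp only [eq_self_iff_true, if_true]
                rw [foldl_stepB_acc, ih2, List.singleton_append]
              | false =>
                simp only [Bool.false_eq_true, if_false]
                rw [foldl_stepB_acc, ih0, List.singleton_append]
          | false =>
            simp only [List.foldl_cons, stepB_1_other _ _ hb hterm, List.nil_append]
            rw [foldl_stepB_acc, ih1]
            simp only [admonLoop, hb, hterm, Bool.false_eq_true, if_false, indent_eq,
              List.singleton_append, List.cons_append, List.append_assoc, List.nil_append]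
      · -- state TAB
        cases hterm : isSectionTerminator x with
        | true =>
          simp only [List.foldl_cons, stepB_2_term _ _ hterm, List.nil_append,
            tabLoop, hterm, eq_self_iff_true, if_true]
          rw [normalize_indentation]
          cases h1 : PySem.Str.startswith (PySem.Str.lstrip x) "!!! " with
          | true =>
            simp only [eq_self_iff_true, if_true]
            rw [foldl_stepB_acc, ih1, List.singleton_append]
          | false =>
            simp only [Bool.false_eq_true, if_false]
            cases h2 : PySem.Str.startswith (PySem.Str.lstrip x) "=== " with
            | true =>
              simp only [eq_self_iff_true, if_true]
              rw [foldl_stepB_acc, ih2, List.singleton_append]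
            | false =>
              simp only [Bool.false_eq_true, if_false]
              rw [foldl_stepB_acc, ih0, List.singleton_append]
        | false =>
          cases hb : PySem.Str.strip x == "" with
          | true =>
            simp only [List.foldl_cons, stepB_2_blank _ _ hterm hb, List.nil_append]
            rw [foldl_stepB_acc, ih2]
            simp only [tabLoop, hterm, hb, eq_self_iff_true, if_true, Bool.false_eq_true, if_false,
              List.singleton_append, List.cons_append, List.append_assoc, List.nil_append]
          | false =>
            simp only [List.foldl_cons, stepB_2_other _ _ hterm hb, List.nil_append]
            rw [foldl_stepB_acc, ih2]
            simp only [tabLoop, hterm, hb, Bool.false_eq_true, if_false, indent_eq,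
              List.singleton_append, List.cons_append, List.append_assoc, List.nil_append]

theorem alt_eq : ∀ l : List String, normalize_indentation_alt l = normalize_indentation l := by
  intro l
  exact (main_inv l.length l le_rfl).1

-- ===== VERDICT (by name: the statement is the Claim_ definition above) =====
theorem normalize_indentation_spec : Claim_equal_normalize_indentation := by
  intro lines _
  unfold Spec_normalize_indentation
  exact (alt_eq lines).symm
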